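-- pv_equiv track=rewrite | github.com/Akif141/Python | WordsGuess.py | hows_my_guess
-- ===== SOURCE A (Python) =====
-- def hows_my_guess(input, mysecret):
--     correct_positioned = 0
--     contains = 0
--     for i in range(5):
--         for j in range(5):
--             if input[i] == mysecret[j]:
--                 if i == j:
--                     correct_positioned += 1
--                 else:
--                     contains += 1
--     return correct_positioned, contains
-- ===== SOURCE B (Python) =====
-- def hows_my_guess(input, mysecret):
--     guess = [input[i] for i in range(5)]
--     secret = [mysecret[i] for i in range(5)]
--     correct_positioned = 0
--     for x, y in zip(guess, secret):
--         if x == y: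
--             correct_positioned += 1
--     cg = {}
--     for x in guess:
--         cg[x] = cg.get(x, 0) + 1
--     cs = {}
--     for y in secret:
--         cs[y] = cs.get(y, 0) + 1
--     total = 0
--     for c, n in cg.items():
--         total += n * cs.get(c, 0)
--     return correct_positioned, total - correct_positioned
-- ===== Notes on version B (the rewrite author's own statement) =====
-- stated objective: alternative
-- what changed: A classifies all 25 index pairs in two nested loops; B makes one positional zip pass for exact matches and multiplies two character-count dictionaries to get the total number of matching (i,j) pairs, with contains = total - exact.
import Mathlib
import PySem

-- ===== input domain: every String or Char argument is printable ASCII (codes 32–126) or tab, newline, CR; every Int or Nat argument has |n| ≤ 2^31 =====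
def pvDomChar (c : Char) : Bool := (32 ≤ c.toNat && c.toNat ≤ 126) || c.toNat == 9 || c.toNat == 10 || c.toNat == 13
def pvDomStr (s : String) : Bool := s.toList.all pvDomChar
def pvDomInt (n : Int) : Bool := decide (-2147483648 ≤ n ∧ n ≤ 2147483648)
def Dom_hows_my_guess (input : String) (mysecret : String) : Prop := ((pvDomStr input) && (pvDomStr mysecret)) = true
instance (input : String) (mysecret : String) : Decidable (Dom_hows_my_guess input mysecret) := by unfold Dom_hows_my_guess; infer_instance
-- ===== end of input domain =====

-- B replaces A's 25 pairwise index comparisons by one positional zip pass plus two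
-- character-count dictionaries whose overlap product counts all matching pairs (alternative decomposition).

-- ===== PORT A =====
def hows_my_guess (input : String) (mysecret : String) : Int × Int :=
  (PySem.List.pyRange 0 5 1).foldl
    (fun st i =>
      (PySem.List.pyRange 0 5 1).foldl
        (fun st j =>
          match PySem.Str.pyGet? input i with
          | none => st
          | some a =>
            match PySem.Str.pyGet? mysecret j with
            | none => st
            | some b =>
              if a = b then
                if i = j then (st.1 + 1, st.2) else (st.1, st.2 + 1)
              else st)
        st)
    ((0 : Int), (0 : Int))

-- ===== PORT B =====
def hows_my_guess_alt (input : String) (mysecret : String) : Int × Int :=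
  let guess := (PySem.List.pyRange 0 5 1).filterMap (fun i => PySem.Str.pyGet? input i)
  let secret := (PySem.List.pyRange 0 5 1).filterMap (fun i => PySem.Str.pyGet? mysecret i)
  let correct := (guess.zip secret).foldl (fun acc p => if p.1 = p.2 then acc + 1 else acc) (0 : Int)
  let cg := guess.foldl (fun d x => d.insert x (d.getD x 0 + 1)) (PySem.Dict.empty : PySem.Dict Char Int)
  let cs := secret.foldl (fun d y => d.insert y (d.getD y 0 + 1)) (PySem.Dict.empty : PySem.Dict Char Int)
  let total := cg.items.foldl (fun acc p => acc + p.2 * cs.getD p.1 0) (0 : Int)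
  (correct, total - correct)

-- ===== PRECONDITION & SPEC =====
-- Pre_ excludes exactly the inputs on which A raises IndexError: either string shorter than 5.
def Pre_hows_my_guess (input : String) (mysecret : String) : Prop :=
  5 ≤ input.toList.length ∧ 5 ≤ mysecret.toList.length
instance (input : String) (mysecret : String) : Decidable (Pre_hows_my_guess input mysecret) := by
  unfold Pre_hows_my_guess; infer_instance
def pvWitness_hows_my_guess : String × String := ("apple", "grape")

def Spec_hows_my_guess (input : String) (mysecret : String) (out : Int × Int) : Prop := out = hows_my_guess_alt input mysecret
instance (input : String) (mysecret : String) (out : Int × Int) : Decidable (Spec_hows_my_guess input mysecret out) := by unfold Spec_hows_my_guess; infer_instance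

-- ===== CLAIM (what is proved, stated in full; the proofs are below) =====
def Claim_equal_hows_my_guess : Prop := ∀ (input : String) (mysecret : String), Dom_hows_my_guess input mysecret → Pre_hows_my_guess input mysecret → Spec_hows_my_guess input mysecret (hows_my_guess input mysecret)

-- ===== LEMMAS AND PROOFS =====

-- pyGet? on an explicitly destructured 5-element prefix, at each literal index
theorem pvPg0 (x0 x1 x2 x3 x4 : Char) (r : List Char) :
    PySem.List.pyGet? (x0::x1::x2::x3::x4::r) (0:Int) = some x0 := by
  simp [PySem.List.pyGet?, PySem.List.pyIdx?]; rw [if_pos (by omega)]; simp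
theorem pvPg1 (x0 x1 x2 x3 x4 : Char) (r : List Char) :
    PySem.List.pyGet? (x0::x1::x2::x3::x4::r) (1:Int) = some x1 := by
  simp [PySem.List.pyGet?, PySem.List.pyIdx?]; rw [if_pos (by omega)]; simp
theorem pvPg2 (x0 x1 x2 x3 x4 : Char) (r : List Char) :
    PySem.List.pyGet? (x0::x1::x2::x3::x4::r) (2:Int) = some x2 := by
  simp [PySem.List.pyGet?, PySem.List.pyIdx?]; rw [if_pos (by omega)]; simp
theorem pvPg3 (x0 x1 x2 x3 x4 : Char) (r : List Char) :
    PySem.List.pyGet? (x0::x1::x2::x3::x4::r) (3:Int) = some x3 := by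
  simp [PySem.List.pyGet?, PySem.List.pyIdx?]; rw [if_pos (by omega)]; simp
theorem pvPg4 (x0 x1 x2 x3 x4 : Char) (r : List Char) :
    PySem.List.pyGet? (x0::x1::x2::x3::x4::r) (4:Int) = some x4 := by
  simp [PySem.List.pyGet?, PySem.List.pyIdx?]; rw [if_pos (by omega)]; simp

-- a fold threading a pair of independent additive counters is a pair of sums
theorem pvFoldPair {β : Type} (l : List β) (f : Int × Int → β → Int × Int) (u v : β → Int)
    (h : ∀ st x, f st x = (st.1 + u x, st.2 + v x)) :
    ∀ c t : Int, l.foldl f (c, t) = (c + (l.map u).sum, t + (l.map v).sum) := by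
  induction l with
  | nil => intro c t; simp
  | cons x xs ih =>
    intro c t
    rw [List.foldl_cons, h, ih]
    simp [List.map_cons, List.sum_cons]
    constructor <;> ring

-- Σ_{c ∈ set(xs)} count(c, xs) * f c = Σ_{x ∈ xs} f x
theorem pvSumCountMul (f : Char → Int) (xs : List Char) :
    ((PySem.Set.ofList xs).map (fun c => (xs.count c : Int) * f c)).sum = (xs.map f).sum := by
  induction xs with
  | nil => simp
  | cons x xs ih =>
    rw [PySem.Set.ofList_cons, List.map_cons, List.sum_cons, List.map_cons, List.sum_cons]
    have hcong : ∀ c ∈ PySem.Set.discard (PySem.Set.ofList xs) x,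
        (((x :: xs).count c : Int) * f c) = ((xs.count c : Int) * f c) := by
      intro c hc
      have hne : c ≠ x := ((PySem.Set.mem_discard _ _ _).1 hc).2
      rw [List.count_cons]
      simp only [beq_iff_eq]
      rw [if_neg (fun h => hne h.symm)]
      push_cast
      ring
    rw [List.map_congr_left hcong]
    have hnd : (PySem.Set.ofList xs).Nodup := PySem.Set.nodup_ofList xs
    have hnd2 : (x :: PySem.Set.discard (PySem.Set.ofList xs) x).Nodup := by
      refine List.nodup_cons.2 ⟨?_, PySem.Set.nodup_discard _ _ hnd⟩
      simp [PySem.Set.mem_discard]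
    by_cases hx : x ∈ xs
    · have hperm : (PySem.Set.ofList xs).Perm (x :: PySem.Set.discard (PySem.Set.ofList xs) x) := by
        refine (List.perm_ext_iff_of_nodup hnd hnd2).2 ?_
        intro a
        simp only [List.mem_cons, PySem.Set.mem_discard, PySem.Set.mem_ofList]
        by_cases ha : a = x
        · subst ha; simp [hx]
        · simp [ha]
      have hsum := (hperm.map (fun c => (xs.count c : Int) * f c)).sum_eq
      rw [List.map_cons, List.sum_cons] at hsum
      rw [List.count_cons]
      simp only [BEq.rfl, if_true]
      push_cast
      rw [ih] at hsum
      linarith [hsum]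
    · have hperm : (PySem.Set.ofList xs).Perm (PySem.Set.discard (PySem.Set.ofList xs) x) := by
        refine (List.perm_ext_iff_of_nodup hnd (PySem.Set.nodup_discard _ _ hnd)).2 ?_
        intro a
        simp only [PySem.Set.mem_discard, PySem.Set.mem_ofList]
        constructor
        · intro h; exact ⟨h, by rintro rfl; exact hx h⟩
        · exact fun h => h.1
      have hsum := (hperm.map (fun c => (xs.count c : Int) * f c)).sum_eq
      rw [ih] at hsum
      have hc0 : xs.count x = 0 := List.count_eq_zero.2 hx
      rw [List.count_cons, hc0]
      simp only [BEq.rfl, if_true]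
      push_cast
      linarith [hsum]

-- any list of length ≥ 5 decomposes into five heads and a tail
theorem pvTake5 {α : Type} (l : List α) (h : 5 ≤ l.length) :
    ∃ a b c d e r, l = a :: b :: c :: d :: e :: r := by
  match l with
  | a :: b :: c :: d :: e :: r => exact ⟨a, b, c, d, e, r, rfl⟩
  | [] | [_] | [_,_] | [_,_,_] | [_,_,_,_] => simp at h

-- the per-cell contribution of A's nested loops, split into the i = j hit and the i ≠ j hits
def pvU2 (gl sl : List Char) (i j : Int) : Int :=
  match PySem.List.pyGet? gl i with
  | none => 0
  | some a =>
    match PySem.List.pyGet? sl j with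
    | none => 0
    | some b => if a = b ∧ i = j then 1 else 0
def pvV2 (gl sl : List Char) (i j : Int) : Int :=
  match PySem.List.pyGet? gl i with
  | none => 0
  | some a =>
    match PySem.List.pyGet? sl j with
    | none => 0
    | some b => if a = b ∧ ¬ i = j then 1 else 0

theorem pvRow2 (gl sl : List Char) (i : Int) (st : Int × Int) :
    (([0,1,2,3,4] : List Int).foldl
      (fun st j =>
        match PySem.List.pyGet? gl i with
        | none => st
        | some a =>
          match PySem.List.pyGet? sl j with
          | none => st
          | some b =>
            if a = b then
              if i = j then (st.1 + 1, st.2) else (st.1, st.2 + 1)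
            else st) st)
    = (st.1 + (([0,1,2,3,4] : List Int).map (pvU2 gl sl i)).sum,
       st.2 + (([0,1,2,3,4] : List Int).map (pvV2 gl sl i)).sum) := by
  obtain ⟨c, t⟩ := st
  refine pvFoldPair _ _ (pvU2 gl sl i) (pvV2 gl sl i) ?_ c t
  intro st j
  unfold pvU2 pvV2
  cases hi : PySem.List.pyGet? gl i with
  | none => simp
  | some a =>
    cases hj : PySem.List.pyGet? sl j with
    | none => simp
    | some b =>
      simp only
      by_cases h1 : a = b <;> by_cases h2 : i = j <;> simp [h1, h2]

theorem pvKey (g0 g1 g2 g3 g4 s0 s1 s2 s3 s4 : Char) (gr sr : List Char)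
    (input mysecret : String)
    (hg : input.toList = g0::g1::g2::g3::g4::gr)
    (hs : mysecret.toList = s0::s1::s2::s3::s4::sr) :
    hows_my_guess input mysecret = hows_my_guess_alt input mysecret := by
  have hrange : PySem.List.pyRange 0 5 1 = ([0,1,2,3,4] : List Int) := by decide
  unfold hows_my_guess hows_my_guess_alt
  rw [hrange]
  simp only [PySem.Str.pyGet?_eq, hg, hs]
  simp only [PySem.Chars.pyGet?]
  simp only [pvRow2]
  simp only [List.filterMap_cons, List.filterMap_nil, pvPg0, pvPg1, pvPg2, pvPg3, pvPg4]
  rw [PySem.Dict.foldl_insert_getD_add_one_eq_counter, PySem.Dict.foldl_insert_getD_add_one_eq_counter]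
  rw [PySem.List.foldl_add, PySem.List.foldl_ite_add_one]
  rw [PySem.Dict.items_counter, List.map_map]
  simp only [Function.comp_def, PySem.Dict.getD_counter]
  rw [pvSumCountMul (fun c => (([s0,s1,s2,s3,s4] : List Char).count c : Int)) [g0,g1,g2,g3,g4]]
  simp only [List.foldl_cons, List.foldl_nil, List.zip_cons_cons, List.zip_nil_right,
    List.countP_cons, List.countP_nil, List.map_cons, List.map_nil, List.sum_cons, List.sum_nil,
    List.count_cons, List.count_nil, beq_iff_eq, decide_eq_true_eq]
  simp only [pvU2, pvV2, pvPg0, pvPg1, pvPg2, pvPg3, pvPg4]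
  norm_num
  have hcomm : ∀ (a b : Char), (if a = b then (1:Int) else 0) = (if b = a then 1 else 0) := by
    intro a b
    by_cases h : a = b
    · simp [h]
    · rw [if_neg h, if_neg (fun hh => h hh.symm)]
  rw [hcomm s0 g0, hcomm s1 g0, hcomm s2 g0, hcomm s3 g0, hcomm s4 g0,
      hcomm s0 g1, hcomm s1 g1, hcomm s2 g1, hcomm s3 g1, hcomm s4 g1,
      hcomm s0 g2, hcomm s1 g2, hcomm s2 g2, hcomm s3 g2, hcomm s4 g2,
      hcomm s0 g3, hcomm s1 g3, hcomm s2 g3, hcomm s3 g3, hcomm s4 g3,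
      hcomm s0 g4, hcomm s1 g4, hcomm s2 g4, hcomm s3 g4, hcomm s4 g4]
  constructor <;> ring

-- ===== VERDICT (by name: the statement is the Claim_ definition above) =====
theorem hows_my_guess_spec : Claim_equal_hows_my_guess := by
  intro input mysecret _hdom hpre
  obtain ⟨h1, h2⟩ := hpre
  obtain ⟨g0, g1, g2, g3, g4, gr, hg⟩ := pvTake5 _ h1
  obtain ⟨s0, s1, s2, s3, s4, sr, hs⟩ := pvTake5 _ h2
  exact pvKey g0 g1 g2 g3 g4 s0 s1 s2 s3 s4 gr sr input mysecret hg hs
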